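-- pv_equiv track=rewrite | github.com/mdandre89/Codewars-exercises | flipping-game/flipping-game.py | flipping_game
-- ===== SOURCE A (Python) =====
-- def flipping_game(ls):
--     M = N = sum(ls)
--     if len(ls)==N:
--         return N-1
--     for i in range(len(ls)+1):
--         for j in range(i):
--             l = N + i - j - 2*sum(ls[j:i])
--             if M < l:
--                 M = l
--     return M
-- ===== SOURCE B (Python) =====
-- def flipping_game(ls):
--     # Kadane's max-subarray on the gain sequence (flipping x contributes 1-2*x).
--     N = sum(ls)
--     if len(ls) == N:
--         return N - 1
--     gains = [1 - 2 * x for x in ls]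
--     best = cur = gains[0]
--     for g in gains[1:]:
--         cur = max(g, cur + g)
--         best = max(best, cur)
--     return max(N, N + best)
-- ===== Notes on version B (the rewrite author's own statement) =====
-- stated objective: faster
-- what changed: Replaces the O(n^3) scan over all (j,i) pairs with re-summed slices by a single Kadane pass over the gain array (1-2*x per element), taking the max with the untouched sum N.
import Mathlib
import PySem

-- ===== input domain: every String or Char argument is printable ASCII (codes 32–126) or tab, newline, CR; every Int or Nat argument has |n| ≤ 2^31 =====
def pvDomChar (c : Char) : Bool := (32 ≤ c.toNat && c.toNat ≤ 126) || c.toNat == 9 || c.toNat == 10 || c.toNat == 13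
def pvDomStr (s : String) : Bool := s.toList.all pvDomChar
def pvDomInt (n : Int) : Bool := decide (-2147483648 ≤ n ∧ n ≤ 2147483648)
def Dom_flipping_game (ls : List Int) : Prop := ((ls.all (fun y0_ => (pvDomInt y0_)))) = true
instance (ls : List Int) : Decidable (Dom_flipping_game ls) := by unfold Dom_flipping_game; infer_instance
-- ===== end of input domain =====

-- B replaces A's O(n^3) all-pairs slice scan by a single Kadane pass over the gain array (faster, asymptotic).

-- ===== PORT A =====
def flipping_game (ls : List Int) : Int :=
  let N := ls.sum
  if PySem.List.len ls = N then N - 1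
  else
    (PySem.List.pyRange 0 (PySem.List.len ls + 1) 1).foldl (fun M i =>
      (PySem.List.pyRange 0 i 1).foldl (fun M j =>
        let l := N + i - j - 2 * (PySem.List.slice ls (some j) (some i)).sum
        if M < l then l else M) M) N

-- ===== PORT B =====
def flipping_game_alt (ls : List Int) : Int :=
  let N := ls.sum
  if PySem.List.len ls = N then N - 1
  else
    let gains := ls.map (fun x => 1 - 2 * x)
    match gains with
    | [] => 0  -- unreachable: the empty list satisfies len(ls) == sum(ls)
    | g0 :: rest =>
      let p := rest.foldl (fun (p : Int × Int) g => (max p.1 (max g (p.2 + g)), max g (p.2 + g))) (g0, g0)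
      max N (N + p.1)

-- ===== PRECONDITION & SPEC =====
def Spec_flipping_game (ls : List Int) (out : Int) : Prop := out = flipping_game_alt ls
instance (ls : List Int) (out : Int) : Decidable (Spec_flipping_game ls out) := by unfold Spec_flipping_game; infer_instance

-- ===== CLAIM (what is proved, stated in full; the proofs are below) =====
def Claim_equal_flipping_game : Prop := ∀ (ls : List Int), Dom_flipping_game ls → Spec_flipping_game ls (flipping_game ls)

-- ===== LEMMAS AND PROOFS =====

/-- sum of the contiguous sublist t[j:i] (Nat indices). -/
def pvSsum (t : List Int) (j i : Nat) : Int := ((t.drop j).take (i - j)).sum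

/-- Kadane's loop body, as in port B. -/
def pvKstep : Int × Int → Int → Int × Int :=
  fun p g => (max p.1 (max g (p.2 + g)), max g (p.2 + g))

theorem pvGainSum (t : List Int) :
    (t.map (fun x => 1 - 2 * x)).sum = (t.length : Int) - 2 * t.sum := by
  induction t with
  | nil => simp
  | cons x xs ih => simp [ih]; ring

theorem pvIfMax (M l : Int) : (if M < l then l else M) = max M l := by
  rw [max_def]; split_ifs <;> omega

/-- nested max-fold flattens to a fold over the flatMap of candidates -/
theorem pvNest (f : Int → List Int) (c : Int → Int → Int) :
    ∀ (l : List Int) (a : Int),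
      l.foldl (fun M i => (f i).foldl (fun M j => max M (c i j)) M) a
        = (l.flatMap (fun i => (f i).map (c i))).foldl max a := by
  intro l
  induction l with
  | nil => intro a; simp
  | cons x xs ih =>
    intro a
    simp only [List.foldl_cons, List.flatMap_cons, List.foldl_append, ih, List.foldl_map]

theorem pvF1 : ∀ (rem : List Int) (b c : Int), b ≤ (rem.foldl pvKstep (b, c)).1 := by
  intro rem
  induction rem with
  | nil => intro b c; simp
  | cons g gs ih =>
    intro b c
    calc b ≤ max b (max g (c + g)) := le_max_left _ _
    _ ≤ _ := by exact ih _ _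

theorem pvF3 : ∀ (rem : List Int) (b c : Int) (k : Nat), 1 ≤ k → k ≤ rem.length →
    c + (rem.take k).sum ≤ (rem.foldl pvKstep (b, c)).1 := by
  intro rem
  induction rem with
  | nil => intro b c k h1 h2; simp at h2; omega
  | cons g gs ih =>
    intro b c k h1 h2
    match k with
    | 1 =>
      simp only [List.take_succ_cons, List.take_zero, List.sum_cons, List.sum_nil, add_zero]
      calc c + g ≤ max g (c + g) := le_max_right _ _
      _ ≤ max b (max g (c + g)) := le_max_right _ _
      _ ≤ _ := pvF1 gs _ _
    | (m + 2) =>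
      simp only [List.take_succ_cons, List.sum_cons, List.foldl_cons, pvKstep]
      have h3 : max g (c + g) + (gs.take (m + 1)).sum ≤ (gs.foldl pvKstep (max b (max g (c + g)), max g (c + g))).1 :=
        ih _ _ (m + 1) (by omega) (by simpa using h2)
      have h4 : c + (g + (gs.take (m + 1)).sum) ≤ max g (c + g) + (gs.take (m + 1)).sum := by
        have := le_max_right g (c + g); omega
      exact le_trans h4 h3

theorem pvF2 : ∀ (rem : List Int) (b c : Int) (j i : Nat), j < i → i ≤ rem.length →
    pvSsum rem j i ≤ (rem.foldl pvKstep (b, c)).1 := by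
  intro rem
  induction rem with
  | nil => intro b c j i h1 h2; simp at h2; omega
  | cons g gs ih =>
    intro b c j i h1 h2
    match j with
    | 0 =>
      match i with
      | 1 =>
        simp only [pvSsum, List.drop_zero, List.take_succ_cons, List.take_zero, List.sum_cons,
          List.sum_nil, add_zero, List.foldl_cons, pvKstep]
        calc g ≤ max g (c + g) := le_max_left _ _
        _ ≤ max b (max g (c + g)) := le_max_right _ _
        _ ≤ _ := pvF1 gs _ _
      | (m + 2) =>
        simp only [pvSsum, List.drop_zero, Nat.sub_zero, List.take_succ_cons, List.sum_cons,
          List.foldl_cons, pvKstep]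
        have h3 : max g (c + g) + (gs.take (m + 1)).sum ≤ (gs.foldl pvKstep (max b (max g (c + g)), max g (c + g))).1 :=
          pvF3 gs _ _ (m + 1) (by omega) (by simpa using h2)
        have h4 : g ≤ max g (c + g) := le_max_left _ _
        omega
    | (j' + 1) =>
      match i with
      | (i' + 1) =>
        simp only [pvSsum, List.drop_succ_cons, List.foldl_cons, pvKstep]
        have heq : i' + 1 - (j' + 1) = i' - j' := by omega
        rw [heq]
        exact ih _ _ j' i' (by omega) (by simpa using h2)

theorem pvF4 : ∀ (rem : List Int) (b c : Int),
    (rem.foldl pvKstep (b, c)).1 = b ∨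
    (∃ k, 1 ≤ k ∧ k ≤ rem.length ∧ (rem.foldl pvKstep (b, c)).1 = c + (rem.take k).sum) ∨
    (∃ j i, j < i ∧ i ≤ rem.length ∧ (rem.foldl pvKstep (b, c)).1 = pvSsum rem j i) := by
  intro rem
  induction rem with
  | nil => intro b c; left; rfl
  | cons g gs ih =>
    intro b c
    simp only [List.foldl_cons, pvKstep]
    rcases ih (max b (max g (c + g))) (max g (c + g)) with h | ⟨k, hk1, hk2, h⟩ | ⟨j, i, hji, hi, h⟩
    · rcases max_choice b (max g (c + g)) with hb | hb
      · left; rw [h, hb]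
      · rcases max_choice g (c + g) with hg | hg
        · right; right
          refine ⟨0, 1, by omega, by simp, ?_⟩
          rw [h, hb, hg]; simp [pvSsum]
        · right; left
          refine ⟨1, le_refl _, by simp, ?_⟩
          rw [h, hb, hg]; simp
    · rcases max_choice g (c + g) with hg | hg
      · right; right
        refine ⟨0, k + 1, by omega, by simp; omega, ?_⟩
        rw [h, hg]; simp [pvSsum]
      · right; left
        refine ⟨k + 1, by omega, by simp; omega, ?_⟩
        rw [h, hg]; simp; ring
    · right; right
      refine ⟨j + 1, i + 1, by omega, by simp; omega, ?_⟩
      rw [h]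
      simp only [pvSsum, List.drop_succ_cons]
      have e : i + 1 - (j + 1) = i - j := by omega
      rw [e]

/-- the candidate value A computes for Nat indices jn < in ≤ |ls| equals N + gain-sum -/
theorem pvCand (ls : List Int) (jn iN : Nat) (h1 : jn < iN) (h2 : iN ≤ ls.length) :
    ls.sum + (iN : Int) - (jn : Int) - 2 * (PySem.List.slice ls (some (jn : Int)) (some (iN : Int))).sum
      = ls.sum + pvSsum (ls.map (fun x => 1 - 2 * x)) jn iN := by
  rw [PySem.List.slice_natCast]
  have hmap : (ls.map (fun x => 1 - 2 * x)).drop jn = (ls.drop jn).map (fun x => 1 - 2 * x) := by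
    exact (List.map_drop).symm
  have htake : ∀ (t : List Int) (m : Nat), (t.map (fun x => 1 - 2 * x)).take m = (t.take m).map (fun x => 1 - 2 * x) := by
    intro t m; exact (List.map_take).symm
  have hlen : ((ls.drop jn).take (iN - jn)).length = iN - jn := by
    simp [List.length_take, List.length_drop]; omega
  simp only [pvSsum, hmap, htake, pvGainSum, hlen]
  push_cast [Nat.cast_sub (le_of_lt h1)]
  ring

theorem pvKadaneLB (g0 : Int) (rest : List Int) :
    ∀ (jn iN : Nat), jn < iN → iN ≤ (g0 :: rest).length →
      pvSsum (g0 :: rest) jn iN ≤ (rest.foldl pvKstep (g0, g0)).1 := by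
  intro jn iN h1 h2
  match jn, iN with
  | 0, 1 =>
    have := pvF1 rest g0 g0
    simpa [pvSsum] using this
  | 0, (m + 2) =>
    have h3 : g0 + (rest.take (m + 1)).sum ≤ (rest.foldl pvKstep (g0, g0)).1 :=
      pvF3 rest g0 g0 (m + 1) (by omega) (by simp at h2; omega)
    simpa [pvSsum] using h3
  | (j + 1), (i + 1) =>
    have h3 : pvSsum rest j i ≤ (rest.foldl pvKstep (g0, g0)).1 :=
      pvF2 rest g0 g0 j i (by omega) (by simp at h2; omega)
    have e : i + 1 - (j + 1) = i - j := by omega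
    simpa [pvSsum, e] using h3

theorem pvKadaneUB (g0 : Int) (rest : List Int) :
    ∃ jn iN, jn < iN ∧ iN ≤ (g0 :: rest).length ∧
      (rest.foldl pvKstep (g0, g0)).1 = pvSsum (g0 :: rest) jn iN := by
  rcases pvF4 rest g0 g0 with h | ⟨k, hk1, hk2, h⟩ | ⟨j, i, hji, hi, h⟩
  · exact ⟨0, 1, by omega, by simp, by simpa [pvSsum] using h⟩
  · refine ⟨0, k + 1, by omega, by simp; omega, ?_⟩
    rw [h]; simp [pvSsum]
  · refine ⟨j + 1, i + 1, by omega, by simp; omega, ?_⟩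
    rw [h]
    simp only [pvSsum, List.drop_succ_cons]
    have e : i + 1 - (j + 1) = i - j := by omega
    rw [e]

theorem flipping_game_eq (ls : List Int) : flipping_game ls = flipping_game_alt ls := by
  by_cases hb : PySem.List.len ls = ls.sum
  · rw [PySem.List.len_eq] at hb
    simp [flipping_game, flipping_game_alt, hb]
  · rw [PySem.List.len_eq] at hb
    match ls with
    | [] => simp at hb
    | y :: ys =>
      simp only [flipping_game, flipping_game_alt, PySem.List.len_eq, if_neg hb, List.map_cons]
      set N := (y :: ys).sum with hN
      set g0 := 1 - 2 * y with hg0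
      set rest := ys.map (fun x => 1 - 2 * x) with hrest
      set n := (y :: ys).length with hn
      have hgl : (g0 :: rest).length = n := by simp [hrest, hn]
      -- reshape A's nested loop into a single max-fold over the candidate list
      have hif : ∀ (M l : Int), (if M < l then l else M) = max M l := pvIfMax
      simp only [hif]
      rw [pvNest (fun i => PySem.List.pyRange 0 i 1)
          (fun i j => N + i - j - 2 * (PySem.List.slice (y :: ys) (some j) (some i)).sum)
          (PySem.List.pyRange 0 ((n : Int) + 1) 1) N]
      -- name both sides
      set LA := ((PySem.List.pyRange 0 ((n : Int) + 1) 1).flatMap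
        (fun i => (PySem.List.pyRange 0 i 1).map
          (fun j => N + i - j - 2 * (PySem.List.slice (y :: ys) (some j) (some i)).sum))) with hLA
      show LA.foldl max N = max N (N + (rest.foldl pvKstep (g0, g0)).1)
      set B := (rest.foldl pvKstep (g0, g0)).1 with hB
      have hcand : ∀ (jn iN : Nat), jn < iN → iN ≤ n →
          N + (iN : Int) - (jn : Int) - 2 * (PySem.List.slice (y :: ys) (some (jn : Int)) (some (iN : Int))).sum
            = N + pvSsum (g0 :: rest) jn iN := by
        intro jn iN h1 h2
        have := pvCand (y :: ys) jn iN h1 (by omega)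
        simpa [hN, hg0, hrest] using this
      apply le_antisymm
      · rcases PySem.List.foldl_max_mem LA N with hm | hm
        · rw [hm]; exact le_max_left _ _
        · rw [hLA] at hm
          simp only [List.mem_flatMap, List.mem_map, PySem.List.mem_pyRange_one] at hm
          obtain ⟨i, ⟨hi0, hi1⟩, j, ⟨hj0, hj1⟩, hx⟩ := hm
          have hiN : i = ((i.toNat : Nat) : Int) := (Int.toNat_of_nonneg hi0).symm
          have hjN : j = ((j.toNat : Nat) : Int) := (Int.toNat_of_nonneg hj0).symm
          rw [hiN, hjN] at hx
          have hlt : j.toNat < i.toNat := by omega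
          have hle : i.toNat ≤ n := by omega
          rw [hcand j.toNat i.toNat hlt hle] at hx
          rw [← hx]
          have := pvKadaneLB g0 rest j.toNat i.toNat hlt (by omega)
          calc N + pvSsum (g0 :: rest) j.toNat i.toNat ≤ N + B := by rw [hB]; omega
          _ ≤ max N (N + B) := le_max_right _ _
      · apply max_le
        · exact (PySem.List.le_foldl_max LA N).1
        · obtain ⟨jn, iN, h1, h2, h3⟩ := pvKadaneUB g0 rest
          have hmem : N + (iN : Int) - (jn : Int) - 2 * (PySem.List.slice (y :: ys) (some (jn : Int)) (some (iN : Int))).sum ∈ LA := by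
            rw [hLA]
            simp only [List.mem_flatMap, List.mem_map, PySem.List.mem_pyRange_one]
            refine ⟨(iN : Int), ⟨by omega, by omega⟩, (jn : Int), ⟨by omega, by omega⟩, rfl⟩
          have hval := hcand jn iN h1 (by omega)
          have := (PySem.List.le_foldl_max LA N).2 _ hmem
          rw [hval] at this
          rw [hB, h3]
          exact this

-- ===== VERDICT (by name: the statement is the Claim_ definition above) =====
theorem flipping_game_spec : Claim_equal_flipping_game := by
  intro ls _
  unfold Spec_flipping_game
  exact flipping_game_eq ls
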